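-- pv_equiv track=rewrite | github.com/MIC728/CPGraph | entity_merge.py | clean_relation_keywords
-- ===== SOURCE A (Python) =====
-- def clean_relation_keywords(keywords_str: str, description: str) -> tuple[list[str], str]:
--     """清洗关系keyword，提取标准关系类型并处理污染内容"""
--     VALID_RELATION_TYPES = {
--         "IS_A", "PART_OF", "BASED_ON", "APPLIES_TO", "EVALUATES",
--         "EXPLAINS", "PRACTICED_BY", "COMPARES_WITH", "LEADS_TO",
--         "OPTIMIZES", "TRANSFORMS_TO"
--     }
--
--     if not keywords_str:
--         return [], description
--
--     # 尝试匹配标准关系类型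
--     cleaned_keywords = []
--     original_keywords = [k.strip() for k in keywords_str.replace('，', ',').split(',') if k.strip()]
--
--     for kw in original_keywords:
--         if kw in VALID_RELATION_TYPES:
--             cleaned_keywords.append(kw)
--         else:
--             # 查找kw中的标准类型前缀
--             found = False
--             for valid_type in VALID_RELATION_TYPES:
--                 if kw.startswith(valid_type + ','):
--                     cleaned_keywords.append(valid_type)
--                     # 剩余部分加入description
--                     remaining = kw[len(valid_type) + 1:].strip()
--                     if remaining:
--                         description = f"{description} [额外关键词: {remaining}]" if description else f"[额外关键词: {remaining}]"
--                     found = True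
--                     break
--
--             if not found and kw:
--                 # 未找到标准类型，保留原keyword并在description中标注
--                 description = f"{description} [未识别关键词: {kw}]" if description else f"[未识别关键词: {kw}]"
--
--     return cleaned_keywords, description
-- ===== SOURCE B (Python) =====
-- def clean_relation_keywords(keywords_str: str, description: str) -> tuple[list[str], str]:
--     """Two filter passes plus a single join instead of one stateful loop (the inner prefix branch is unreachable: split pieces contain no comma)."""
--     VALID_RELATION_TYPES = {
--         "IS_A", "PART_OF", "BASED_ON", "APPLIES_TO", "EVALUATES",
--         "EXPLAINS", "PRACTICED_BY", "COMPARES_WITH", "LEADS_TO",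
--         "OPTIMIZES", "TRANSFORMS_TO"
--     }
--     if not keywords_str:
--         return [], description
--     tokens = [k.strip() for k in keywords_str.replace('，', ',').split(',') if k.strip()]
--     cleaned = [kw for kw in tokens if kw in VALID_RELATION_TYPES]
--     notes = [f"[未识别关键词: {kw}]" for kw in tokens if kw not in VALID_RELATION_TYPES]
--     parts = ([description] if description else []) + notes
--     return cleaned, " ".join(parts)
-- ===== Notes on version B (the rewrite author's own statement) =====
-- stated objective: simpler
-- what changed: Replaces A's single stateful loop (which threads description through each iteration and contains an unreachable inner prefix-matching scan over the valid-type set, since comma-split tokens can never contain a comma) by two filter passes over the normalized tokens plus one ' '.join of the annotation parts.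
import Mathlib
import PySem

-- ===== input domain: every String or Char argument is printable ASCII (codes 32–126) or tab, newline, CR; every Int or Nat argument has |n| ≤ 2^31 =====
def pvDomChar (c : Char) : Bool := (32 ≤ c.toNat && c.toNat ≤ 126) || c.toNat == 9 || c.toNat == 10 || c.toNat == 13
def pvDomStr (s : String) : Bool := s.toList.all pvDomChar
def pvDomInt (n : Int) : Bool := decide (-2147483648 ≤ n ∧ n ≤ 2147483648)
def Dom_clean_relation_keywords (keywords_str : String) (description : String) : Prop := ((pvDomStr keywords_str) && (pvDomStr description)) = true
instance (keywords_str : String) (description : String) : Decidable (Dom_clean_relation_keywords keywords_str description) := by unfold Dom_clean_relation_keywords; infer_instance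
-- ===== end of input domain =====

-- B replaces A's single stateful loop (with its unreachable inner prefix-scan) by two filter passes and one join; objective: simpler.

-- ===== PORT A =====
-- the VALID_RELATION_TYPES set literal (distinct elements, literal order)
def pvValidTypes : List String :=
  ["IS_A", "PART_OF", "BASED_ON", "APPLIES_TO", "EVALUATES",
   "EXPLAINS", "PRACTICED_BY", "COMPARES_WITH", "LEADS_TO",
   "OPTIMIZES", "TRANSFORMS_TO"]

-- [k.strip() for k in keywords_str.replace('，', ',').split(',') if k.strip()]  (identical line in A and B)
def pvTokens (keywords_str : String) : List String :=
  ((PySem.Chars.splitOn (PySem.Str.replace keywords_str "，" ",").toList [',']).map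
      (fun p => String.ofList (PySem.Chars.strip p))).filter (fun k => k ≠ "")

-- A's inner 'for valid_type in VALID_RELATION_TYPES: …' loop; returns (cleaned, description, found)
def pvInner (vts : List String) (kw : String) (cleaned : List String) (description : String) :
    List String × String × Bool :=
  match vts with
  | [] => (cleaned, description, false)
  | vt :: rest =>
    if PySem.Str.startswith kw (vt ++ ",") then
      let remaining := PySem.Str.strip (PySem.Str.slice kw (some (PySem.Str.len vt + 1)) none)
      let description' :=
        if remaining ≠ "" then
          (if description ≠ "" then description ++ " [额外关键词: " ++ remaining ++ "]"
           else "[额外关键词: " ++ remaining ++ "]")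
        else description
      (cleaned ++ [vt], description', true)
    else pvInner rest kw cleaned description

-- A's outer 'for kw in original_keywords: …' loop over the state (cleaned_keywords, description)
def pvOuter (tokens : List String) (cleaned : List String) (description : String) :
    List String × String :=
  match tokens with
  | [] => (cleaned, description)
  | kw :: rest =>
    if pvValidTypes.contains kw then pvOuter rest (cleaned ++ [kw]) description
    else
      let r := pvInner pvValidTypes kw cleaned description
      let description' :=
        if ¬ r.2.2 ∧ kw ≠ "" then
          (if r.2.1 ≠ "" then r.2.1 ++ " [未识别关键词: " ++ kw ++ "]"
           else "[未识别关键词: " ++ kw ++ "]")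
        else r.2.1
      pvOuter rest r.1 description'

def clean_relation_keywords (keywords_str : String) (description : String) : List String × String :=
  if keywords_str = "" then ([], description)
  else pvOuter (pvTokens keywords_str) [] description

-- ===== PORT B =====
def clean_relation_keywords_alt (keywords_str : String) (description : String) : List String × String :=
  if keywords_str = "" then ([], description)
  else
    let tokens := pvTokens keywords_str
    let cleaned := tokens.filter (fun kw => pvValidTypes.contains kw)
    let notes := (tokens.filter (fun kw => ! pvValidTypes.contains kw)).map
        (fun kw => "[未识别关键词: " ++ kw ++ "]")
    let parts := (if description ≠ "" then [description] else []) ++ notes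
    (cleaned, PySem.Str.join " " parts)

-- ===== PRECONDITION & SPEC =====
def Spec_clean_relation_keywords (keywords_str : String) (description : String) (out : List String × String) : Prop := out = clean_relation_keywords_alt keywords_str description
instance (keywords_str : String) (description : String) (out : List String × String) : Decidable (Spec_clean_relation_keywords keywords_str description out) := by unfold Spec_clean_relation_keywords; infer_instance

-- ===== CLAIM (what is proved, stated in full; the proofs are below) =====
def Claim_equal_clean_relation_keywords : Prop := ∀ (keywords_str : String) (description : String), Dom_clean_relation_keywords keywords_str description → Spec_clean_relation_keywords keywords_str description (clean_relation_keywords keywords_str description)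

-- ===== LEMMAS AND PROOFS =====

-- pieces produced by splitting on ',' contain no ','
theorem pv_go_no_comma (fuel : Nat) :
    ∀ (l cur : List Char) (acc : List (List Char)),
      l.length < fuel → (∀ p ∈ acc, (',' : Char) ∉ p) → (',' : Char) ∉ cur →
      ∀ p ∈ PySem.Chars.splitOn.go [','] fuel l cur acc, (',' : Char) ∉ p := by
  induction fuel with
  | zero => intro l _ _ h; omega
  | succ n ih =>
    intro l cur acc hlen hacc hcur p hp
    match l with
    | [] =>
      simp [PySem.Chars.splitOn.go] at hp
      rcases hp with h | h
      · exact hacc p h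
      · subst h; simpa using hcur
    | c :: rest =>
      by_cases hc : (',' : Char) = c
      · subst hc
        simp [PySem.Chars.splitOn.go] at hp
        refine ih rest [] (cur.reverse :: acc) (by simp at hlen ⊢; omega) ?_ (by simp) p hp
        intro q hq
        rcases List.mem_cons.mp hq with hq | hq
        · subst hq; simpa using hcur
        · exact hacc q hq
      · simp [PySem.Chars.splitOn.go, hc] at hp
        refine ih rest (c :: cur) acc (by simp at hlen ⊢; omega) hacc ?_ p hp
        simp only [List.mem_cons, not_or]
        exact ⟨hc, hcur⟩

theorem pv_mem_strip {x : Char} {s : List Char} (h : x ∈ PySem.Chars.strip s) : x ∈ s := by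
  simp only [PySem.Chars.strip, PySem.Chars.rstrip, PySem.Chars.lstrip, List.mem_reverse] at h
  have h2 : x ∈ (List.dropWhile PySem.Chars.isspace s).reverse :=
    List.Sublist.mem h (List.dropWhile_sublist _)
  exact List.Sublist.mem (List.mem_reverse.mp h2) (List.dropWhile_sublist _)

theorem pv_tokens_fact (ks : String) : ∀ kw ∈ pvTokens ks, kw ≠ "" ∧ (',' : Char) ∉ kw.toList := by
  intro kw hkw
  unfold pvTokens at hkw
  simp only [List.mem_filter, List.mem_map, decide_eq_true_eq] at hkw
  obtain ⟨⟨p, hp, rfl⟩, hne⟩ := hkw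
  refine ⟨hne, ?_⟩
  intro hc
  rw [String.toList_ofList] at hc
  exact pv_go_no_comma ((PySem.Str.replace ks "，" ",").toList.length + 1)
    (PySem.Str.replace ks "，" ",").toList [] [] (by omega) (by simp) (by simp) p
    (by simpa [PySem.Chars.splitOn] using hp) (pv_mem_strip hc)

theorem pv_startswith_false (kw vt : String) (h : (',' : Char) ∉ kw.toList) :
    PySem.Chars.startswith kw.toList (vt.toList ++ [',']) = false := by
  rw [Bool.eq_false_iff]
  intro hs
  exact h (((PySem.Chars.startswith_iff _ _).mp hs).subset (by simp))

theorem pv_inner_noop (vts : List String) (kw : String) (cleaned : List String) (d : String)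
    (h : (',' : Char) ∉ kw.toList) : pvInner vts kw cleaned d = (cleaned, d, false) := by
  induction vts with
  | nil => rfl
  | cons vt rest ih => simp [pvInner, pv_startswith_false kw vt h, ih]

theorem pv_join_cons_append (sep a b : List Char) (l : List (List Char)) :
    PySem.Chars.join sep ((a ++ sep ++ b) :: l) = a ++ sep ++ PySem.Chars.join sep (b :: l) := by
  cases l with
  | nil => simp [PySem.Chars.join_singleton]
  | cons x xs => simp [PySem.Chars.join_cons_cons, List.append_assoc]

theorem pv_append_ne (s : String) : s ++ "]" ≠ "" := by
  intro h
  have := congrArg String.toList h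
  simp at this

theorem pv_append_ne_left (u v : String) (h : v ≠ "") : u ++ v ≠ "" := by
  intro he
  apply h
  have := congrArg String.toList he
  simp only [String.toList_append] at this
  have h2 : u.toList = [] ∧ v.toList = [] := List.append_eq_nil_iff.mp (by simpa using this)
  rw [← String.toList_inj]
  simpa using h2.2

theorem pv_join_step (d note : String) (notes : List String) :
    PySem.Str.join " " ((if d ≠ "" then [d] else []) ++ note :: notes) =
    PySem.Str.join " " ((if d ≠ "" then d ++ " " ++ note else note) :: notes) := by
  by_cases hd : d = ""
  · simp [hd]
  · simp only [hd, ne_eq, not_false_iff, if_true, List.cons_append, List.nil_append]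
    unfold PySem.Str.join
    congr 1
    simp only [List.map_cons, String.toList_append]
    rw [PySem.Chars.join_cons_cons, pv_join_cons_append]

theorem pv_split_annot (d kw : String) :
    d ++ " [未识别关键词: " ++ kw ++ "]" = d ++ " " ++ ("[未识别关键词: " ++ kw ++ "]") := by
  simp [← String.toList_inj, String.toList_append]

theorem pv_outer_eq (tokens : List String) :
    ∀ (cleaned : List String) (d : String),
      (∀ kw ∈ tokens, kw ≠ "" ∧ (',' : Char) ∉ kw.toList) →
      pvOuter tokens cleaned d =
        (cleaned ++ tokens.filter (fun kw => pvValidTypes.contains kw),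
         PySem.Str.join " " ((if d ≠ "" then [d] else []) ++
           (tokens.filter (fun kw => ! pvValidTypes.contains kw)).map
             (fun kw => "[未识别关键词: " ++ kw ++ "]"))) := by
  induction tokens with
  | nil =>
    intro cleaned d _
    by_cases hd : d = "" <;>
      simp [pvOuter, PySem.Str.join, hd, PySem.Chars.join_nil, PySem.Chars.join_singleton]
  | cons kw rest ih =>
    intro cleaned d h
    obtain ⟨hne, hnc⟩ := h kw (by simp)
    have hr : ∀ kw' ∈ rest, kw' ≠ "" ∧ (',' : Char) ∉ kw'.toList := fun kw' hk => h kw' (by simp [hk])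
    by_cases hv : kw ∈ pvValidTypes
    · have hvc : pvValidTypes.contains kw = true := by simpa using hv
      simp only [pvOuter, hvc, if_true]
      rw [ih _ _ hr]
      simp [hv, List.append_assoc]
    · have hvc : pvValidTypes.contains kw = false := by simpa using hv
      simp only [pvOuter, hvc, Bool.false_eq_true, if_false, pv_inner_noop _ _ _ _ hnc]
      rw [if_pos (show ¬False ∧ kw ≠ "" from ⟨not_false, hne⟩), ih _ _ hr]
      have hd' : (if d ≠ "" then d ++ " [未识别关键词: " ++ kw ++ "]"
                  else "[未识别关键词: " ++ kw ++ "]") =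
                 (if d ≠ "" then d ++ " " ++ ("[未识别关键词: " ++ kw ++ "]")
                  else "[未识别关键词: " ++ kw ++ "]") := by
        by_cases hd : d = "" <;> simp [hd, pv_split_annot]
      rw [hd']
      simp only [List.filter_cons, hvc, Bool.not_false, if_true, if_false, Bool.false_eq_true,
        List.map_cons]
      rw [pv_join_step d ("[未识别关键词: " ++ kw ++ "]")]
      have hY : (if d = "" then "[未识别关键词: " ++ kw ++ "]"
                 else d ++ " " ++ ("[未识别关键词: " ++ kw ++ "]")) ≠ "" := by
        by_cases hdd : d = ""
        · simpa [hdd] using pv_append_ne ("[未识别关键词: " ++ kw)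
        · simpa [hdd] using pv_append_ne_left (d ++ " ") _ (pv_append_ne ("[未识别关键词: " ++ kw))
      simp [hY]

-- ===== VERDICT (by name: the statement is the Claim_ definition above) =====
theorem clean_relation_keywords_spec : Claim_equal_clean_relation_keywords := by
  intro ks d _
  unfold Spec_clean_relation_keywords clean_relation_keywords clean_relation_keywords_alt
  by_cases h : ks = ""
  · simp [h]
  · simp only [h, if_false]
    rw [pv_outer_eq (pvTokens ks) [] d (pv_tokens_fact ks)]
    simp
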